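-- pv_equiv track=rewrite | github.com/r-earthengine/ee_extra | ee_extra/JavaScript/utils_loops.py | search_iterator
-- ===== SOURCE A (Python) =====
-- def search_iterator(lines, start=0):
--     """Search for iterators in the code
--
--     Args:
--         lines ([list]): A list with Javascript syntax as strings.
--         start ([int, optional]): The start line to start to search by iterators. Defaults to 0.
--
--     Returns:
--         [list]: A list of tuple (index, operator)
--     """
--     save_lines = list()
--     iterator_ops = ["--", "++", "+=", "-="]
--     for iterator_op in iterator_ops:
--         for index in range(start, len(lines)):
--             if iterator_op in lines[index]:
--                 save_lines.append((index, iterator_op))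
--     return save_lines
-- ===== SOURCE B (Python) =====
-- def search_iterator(lines, start=0):
--     """Single pass over the lines: collect hits for each of the four
--     operators into its own bucket, then concatenate the buckets in the
--     fixed operator order (instead of four independent full scans)."""
--     dec, inc, pluseq, minuseq = [], [], [], []
--     for index in range(start, len(lines)):
--         line = lines[index]
--         if "--" in line:
--             dec.append((index, "--"))
--         if "++" in line:
--             inc.append((index, "++"))
--         if "+=" in line:
--             pluseq.append((index, "+="))
--         if "-=" in line:
--             minuseq.append((index, "-="))
--     return dec + inc + pluseq + minuseq
-- ===== Notes on version B (the rewrite author's own statement) =====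
-- stated objective: alternative
-- what changed: Replaces A's four independent full scans (one per operator) with a single pass over the lines that fills four per-operator buckets, concatenated at the end in the fixed operator order.
-- outside the precondition, e.g. on search_iterator(['a'], -2): A raises IndexError, B raises IndexError
import Mathlib
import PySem

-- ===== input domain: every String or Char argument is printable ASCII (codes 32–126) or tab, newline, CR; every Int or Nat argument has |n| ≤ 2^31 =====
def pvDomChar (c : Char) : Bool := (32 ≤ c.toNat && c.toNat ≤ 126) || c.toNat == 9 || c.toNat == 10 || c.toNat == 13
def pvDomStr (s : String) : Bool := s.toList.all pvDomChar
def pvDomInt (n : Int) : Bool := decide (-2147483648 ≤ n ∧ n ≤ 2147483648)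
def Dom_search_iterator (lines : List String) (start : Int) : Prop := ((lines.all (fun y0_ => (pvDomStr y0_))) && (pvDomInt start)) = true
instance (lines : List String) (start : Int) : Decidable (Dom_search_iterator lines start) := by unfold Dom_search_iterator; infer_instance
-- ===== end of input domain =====

-- B replaces A's four independent full scans (one per operator) by a single pass filling
-- four per-operator buckets that are concatenated at the end; same output, alternative structure.

-- ===== PORT A =====
def search_iterator (lines : List String) (start : Int) : List (Int × String) :=
  (["--", "++", "+=", "-="]).foldl
    (fun save_lines iterator_op =>
      (PySem.List.pyRange start (lines.length : Int) 1).foldl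
        (fun acc index =>
          if PySem.Str.isIn iterator_op ((PySem.List.pyGet? lines index).getD "") then
            acc ++ [(index, iterator_op)]
          else acc)
        save_lines)
    []

-- ===== PORT B =====
def pvStepB (lines : List String)
    (st : List (Int × String) × List (Int × String) × List (Int × String) × List (Int × String))
    (index : Int) :
    List (Int × String) × List (Int × String) × List (Int × String) × List (Int × String) :=
  let line := (PySem.List.pyGet? lines index).getD ""
  let st := if PySem.Str.isIn "--" line then (st.1 ++ [(index, "--")], st.2.1, st.2.2.1, st.2.2.2) else st
  let st := if PySem.Str.isIn "++" line then (st.1, st.2.1 ++ [(index, "++")], st.2.2.1, st.2.2.2) else st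
  let st := if PySem.Str.isIn "+=" line then (st.1, st.2.1, st.2.2.1 ++ [(index, "+=")], st.2.2.2) else st
  let st := if PySem.Str.isIn "-=" line then (st.1, st.2.1, st.2.2.1, st.2.2.2 ++ [(index, "-=")]) else st
  st

def search_iterator_alt (lines : List String) (start : Int) : List (Int × String) :=
  let r := (PySem.List.pyRange start (lines.length : Int) 1).foldl (pvStepB lines) ([], [], [], [])
  r.1 ++ r.2.1 ++ r.2.2.1 ++ r.2.2.2

-- ===== PRECONDITION & SPEC =====
-- Pre_ excludes exactly the inputs on which Python A raises IndexError:
-- start below -len(lines) while the range start..len(lines) is non-empty.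
def Pre_search_iterator (lines : List String) (start : Int) : Prop :=
  (-(lines.length : Int) ≤ start) ∨ ((lines.length : Int) ≤ start)
instance (lines : List String) (start : Int) : Decidable (Pre_search_iterator lines start) := by
  unfold Pre_search_iterator; infer_instance
def pvWitness_search_iterator : List String × Int := (["i++;", "x -= 1"], 0)

def Spec_search_iterator (lines : List String) (start : Int) (out : List (Int × String)) : Prop := out = search_iterator_alt lines start
instance (lines : List String) (start : Int) (out : List (Int × String)) : Decidable (Spec_search_iterator lines start out) := by unfold Spec_search_iterator; infer_instance

-- ===== CLAIM (what is proved, stated in full; the proofs are below) =====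
def Claim_equal_search_iterator : Prop := ∀ (lines : List String) (start : Int), Dom_search_iterator lines start → Pre_search_iterator lines start → Spec_search_iterator lines start (search_iterator lines start)

-- ===== LEMMAS AND PROOFS =====

-- line tested at an index, and the per-operator hit list over a list of indices
def pvLine (lines : List String) (i : Int) : String := (PySem.List.pyGet? lines i).getD ""

def pvHits (lines : List String) (op : String) (L : List Int) : List (Int × String) :=
  (L.filter (fun i => PySem.Str.isIn op (pvLine lines i))).map (fun i => (i, op))

-- A's inner scan for one operator is acc ++ hits
theorem pvScanA (lines : List String) (op : String) (L : List Int) (acc : List (Int × String)) :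
    L.foldl (fun acc index =>
        if PySem.Str.isIn op ((PySem.List.pyGet? lines index).getD "") then
          acc ++ [(index, op)] else acc) acc
      = acc ++ pvHits lines op L := by
  simpa [pvHits, pvLine] using
    PySem.List.foldl_append_if (l := L)
      (p := fun i => PySem.Str.isIn op (pvLine lines i))
      (f := fun i => (i, op)) (acc := acc)

-- B's single pass extends each bucket by its operator's hit list
theorem pvFoldB (lines : List String) (L : List Int)
    (a b c d : List (Int × String)) :
    L.foldl (pvStepB lines) (a, b, c, d)
      = (a ++ pvHits lines "--" L, b ++ pvHits lines "++" L,
         c ++ pvHits lines "+=" L, d ++ pvHits lines "-=" L) := by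
  induction L generalizing a b c d with
  | nil => simp [pvHits]
  | cons i L ih =>
      simp only [List.foldl_cons, pvStepB]
      split_ifs <;> simp_all [pvHits, pvLine]

theorem search_iterator_eq (lines : List String) (start : Int) :
    search_iterator lines start = search_iterator_alt lines start := by
  unfold search_iterator search_iterator_alt
  simp only [List.foldl_cons, List.foldl_nil, pvFoldB]
  rw [pvScanA, pvScanA, pvScanA, pvScanA]
  simp [List.append_assoc]

-- ===== VERDICT (by name: the statement is the Claim_ definition above) =====
theorem search_iterator_spec : Claim_equal_search_iterator := by
  intro lines start _ _
  unfold Spec_search_iterator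
  exact search_iterator_eq lines start
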